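-- pv_equiv track=rewrite | github.com/larroy/osmtransform | planet/stitch.py | equiv
-- ===== SOURCE A (Python) =====
-- import collections
--
-- def equiv(xs, ys):
--     if len(xs) != len(ys):
--         return False
--     for (i, x) in enumerate(xs):
--         y = ys[i]
--         if len(x) != len(y):
--             return False
--         elif x == y:
--             continue
--         else:
--             rotation = False
--             x_ = x[:-1]
--             for rot_n in range(len(x_)):
--                 rot = collections.deque(x_)
--                 rot.rotate(rot_n)
--                 rot_x = list(rot)
--                 rot_x.append(rot_x[0])
--                 if rot_x == y:
--                     rotation = True
--                     break
--             x_.reverse()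
--             for rot_n in range(len(x_)):
--                 rot = collections.deque(x_)
--                 rot.rotate(rot_n)
--                 rot_x = list(rot)
--                 rot_x.append(rot_x[0])
--                 if rot_x == y:
--                     rotation = True
--                     break
--
--             if not rotation:
--                 return False
--
--     return True
-- ===== SOURCE B (Python) =====
-- def _contains(hay, needle):
--     m = len(needle)
--     for i in range(len(hay) - m + 1):
--         if hay[i:i + m] == needle:
--             return True
--     return False
--
--
-- def equiv(xs, ys):
--     if len(xs) != len(ys):
--         return False
--     for x, y in zip(xs, ys):
--         if len(x) != len(y):
--             return False
--         if x == y: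
--             continue
--         n = len(x) - 1
--         if n <= 0 or y[-1] != y[0]:
--             return False
--         x_ = x[:-1]
--         y_ = y[:-1]
--         rev = x_[::-1]
--         if not (_contains(x_ + x_, y_) or _contains(rev + rev, y_)):
--             return False
--     return True
-- ===== Notes on version B (the rewrite author's own statement) =====
-- stated objective: alternative
-- what changed: Per ring, B replaces A's enumeration of all deque rotations (building and comparing a full rotated copy for each offset, forward and reversed) with one ring-closure check plus a substring search for the ring body inside the doubled body and doubled reversed body.
import Mathlib
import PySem

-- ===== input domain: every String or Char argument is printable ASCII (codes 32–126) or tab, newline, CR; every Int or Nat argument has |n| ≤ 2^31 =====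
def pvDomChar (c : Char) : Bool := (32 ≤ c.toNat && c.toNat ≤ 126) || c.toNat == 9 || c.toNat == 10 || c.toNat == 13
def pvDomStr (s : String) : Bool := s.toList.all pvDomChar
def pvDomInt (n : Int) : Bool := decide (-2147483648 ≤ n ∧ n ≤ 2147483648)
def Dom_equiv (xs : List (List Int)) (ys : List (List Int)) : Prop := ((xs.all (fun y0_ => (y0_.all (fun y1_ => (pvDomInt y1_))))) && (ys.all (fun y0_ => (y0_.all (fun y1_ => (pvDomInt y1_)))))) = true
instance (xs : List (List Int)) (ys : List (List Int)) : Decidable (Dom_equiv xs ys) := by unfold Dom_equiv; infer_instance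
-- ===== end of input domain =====

-- B replaces A's per-ring enumeration of deque rotations with one closure check
-- plus a substring search of the ring body in the doubled body (forward and
-- reversed); an alternative algorithm of similar measured cost; return value only.

-- ===== PORT A =====
-- deque(l) after rotate(k) for 0 ≤ k < len(l): right rotation by k.
def pvRotR (l : List Int) (k : Nat) : List Int :=
  l.drop (l.length - k) ++ l.take (l.length - k)

-- A's per-ring body: the two flag-setting loops with break become `any` over the
-- same range; x[:-1] is dropLast; rot_x[0] is headD 0 (rot_x is nonempty whenever
-- a loop body runs, since rot_n < len(x_) forces len(x_) ≥ 1).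
def pvCheckA (x y : List Int) : Bool :=
  if x.length ≠ y.length then false
  else if x = y then true
  else
    let x_ := x.dropLast
    let fwd := (List.range x_.length).any fun rot_n =>
      let rot_x := pvRotR x_ rot_n
      decide (rot_x ++ [rot_x.headD 0] = y)
    let rev := x_.reverse
    let bwd := (List.range rev.length).any fun rot_n =>
      let rot_x := pvRotR rev rot_n
      decide (rot_x ++ [rot_x.headD 0] = y)
    fwd || bwd

def equiv (xs : List (List Int)) (ys : List (List Int)) : Bool :=
  if xs.length ≠ ys.length then false
  else (xs.zip ys).all fun p => pvCheckA p.1 p.2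

-- ===== PORT B =====
-- B's helper _contains: scan all start positions of needle-sized windows in hay.
def pvContains (hay needle : List Int) : Bool :=
  (List.range (hay.length - needle.length + 1)).any fun i =>
    decide ((hay.drop i).take needle.length = needle)

def pvCheckB (x y : List Int) : Bool :=
  if x.length ≠ y.length then false
  else if x = y then true
  else
    let n := x.length - 1
    if n = 0 ∨ y.getLastD 0 ≠ y.headD 0 then false
    else
      let x_ := x.dropLast
      let y_ := y.dropLast
      let rev := x_.reverse
      pvContains (x_ ++ x_) y_ || pvContains (rev ++ rev) y_

def equiv_alt (xs : List (List Int)) (ys : List (List Int)) : Bool :=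
  if xs.length ≠ ys.length then false
  else (xs.zip ys).all fun p => pvCheckB p.1 p.2

-- ===== PRECONDITION & SPEC =====
def Spec_equiv (xs : List (List Int)) (ys : List (List Int)) (out : Bool) : Prop := out = equiv_alt xs ys
instance (xs : List (List Int)) (ys : List (List Int)) (out : Bool) : Decidable (Spec_equiv xs ys out) := by unfold Spec_equiv; infer_instance

-- ===== CLAIM (what is proved, stated in full; the proofs are below) =====
def Claim_equal_equiv : Prop := ∀ (xs : List (List Int)) (ys : List (List Int)), Dom_equiv xs ys → Spec_equiv xs ys (equiv xs ys)

-- ===== LEMMAS AND PROOFS =====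

-- a needle-length window of the doubled list is a left rotation
lemma window_eq (l : List Int) (j : Nat) (hj : j ≤ l.length) :
    ((l ++ l).drop j).take l.length = l.drop j ++ l.take j := by
  rw [List.drop_append_of_le_length hj, List.take_append]
  have h1 : (l.drop j).length ≤ l.length := by simp
  rw [List.take_of_length_le h1, List.length_drop]
  have h2 : l.length - (l.length - j) = j := by omega
  rw [h2]

-- the right rotations of l (k < n) are exactly the windows (j ≤ n) of l ++ l
lemma exists_rot_iff_window (l y_ : List Int) (hl : 1 ≤ l.length) :
    (∃ k < l.length, pvRotR l k = y_) ↔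
      (∃ j < l.length + 1, ((l ++ l).drop j).take l.length = y_) := by
  constructor
  · rintro ⟨k, hk, rfl⟩
    exact ⟨l.length - k, by omega, by rw [window_eq l _ (by omega)]; rfl⟩
  · rintro ⟨j, hj, rfl⟩
    rw [window_eq l j (by omega)]
    by_cases h0 : j = 0
    · subst h0
      exact ⟨0, by omega, by simp [pvRotR]⟩
    · by_cases hn : j = l.length
      · subst hn
        exact ⟨0, by omega, by simp [pvRotR]⟩
      · refine ⟨l.length - j, by omega, ?_⟩
        unfold pvRotR
        congr 2 <;> omega

-- closing a rotation with its own head hits y iff y closes and the rotation is y's body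
lemma closed_eq_iff (r y : List Int) (hr : 1 ≤ r.length) (hy : y.length = r.length + 1) :
    r ++ [r.headD 0] = y ↔ (y.getLastD 0 = y.headD 0 ∧ r = y.dropLast) := by
  obtain ⟨y_, c, rfl⟩ : ∃ y_ c, y = y_ ++ [c] := by
    rcases List.eq_nil_or_concat y with h | ⟨y_, c, h⟩
    · subst h; simp at hy
    · exact ⟨y_, c, by simpa [List.concat_eq_append] using h⟩
  have hy_ : y_.length = r.length := by simp at hy; omega
  have hy_ne : y_ ≠ [] := by
    intro h; subst h; simp at hy_; omega
  have hhead : (y_ ++ [c]).headD 0 = y_.headD 0 := by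
    cases y_ with
    | nil => exact absurd rfl hy_ne
    | cons a t => simp
  constructor
  · intro h
    obtain ⟨h1, h2⟩ := List.append_inj' h (by simp)
    simp only [List.cons.injEq, and_true] at h2
    subst h1
    refine ⟨?_, by rw [List.dropLast_concat]⟩
    rw [List.getLastD_concat, hhead, ← h2]
  · rintro ⟨hcl, hr'⟩
    rw [List.dropLast_concat] at hr'
    subst hr'
    rw [List.getLastD_concat, hhead] at hcl
    rw [hcl]

-- one ring, one direction: A's rotation `any` equals the closure test plus B's search
lemma pvRotR_length (l : List Int) (k : Nat) : (pvRotR l k).length = l.length := by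
  simp [pvRotR]

lemma any_rot_eq (l y : List Int) (hl : 1 ≤ l.length) (hy : y.length = l.length + 1) :
    ((List.range l.length).any fun k =>
        decide (pvRotR l k ++ [(pvRotR l k).headD 0] = y))
      = (decide (y.getLastD 0 = y.headD 0) && pvContains (l ++ l) y.dropLast) := by
  have hm : y.dropLast.length = l.length := by
    rw [List.length_dropLast, hy]
    omega
  rw [Bool.eq_iff_iff]
  simp only [List.any_eq_true, List.mem_range, decide_eq_true_eq, Bool.and_eq_true,
    pvContains, List.length_append, hm]
  have hb : l.length + l.length - l.length + 1 = l.length + 1 := by omega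
  rw [hb]
  have hclosed : ∀ k, 1 ≤ (pvRotR l k).length ∧ y.length = (pvRotR l k).length + 1 := by
    intro k; rw [pvRotR_length]; exact ⟨hl, hy⟩
  constructor
  · rintro ⟨k, hk, hkeq⟩
    obtain ⟨hcl, hrot⟩ := (closed_eq_iff _ y (hclosed k).1 (hclosed k).2).mp hkeq
    exact ⟨hcl, (exists_rot_iff_window l y.dropLast hl).mp ⟨k, hk, hrot⟩⟩
  · rintro ⟨hcl, i, hi, hieq⟩
    obtain ⟨k, hk, hkeq⟩ := (exists_rot_iff_window l y.dropLast hl).mpr ⟨i, hi, hieq⟩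
    exact ⟨k, hk, (closed_eq_iff _ y (hclosed k).1 (hclosed k).2).mpr ⟨hcl, hkeq⟩⟩

lemma checkPair_eq (x y : List Int) : pvCheckA x y = pvCheckB x y := by
  simp only [pvCheckA, pvCheckB]
  split
  · rfl
  next hlen =>
  split
  · rfl
  next hxy =>
  have hlen' : x.length = y.length := not_ne_iff.mp hlen
  have hxne : x ≠ [] := by
    intro h; subst h
    cases y with
    | nil => exact hxy rfl
    | cons a t => simp at hlen'
  have hxpos : 1 ≤ x.length := List.length_pos_of_ne_nil hxne
  by_cases hn : x.length - 1 = 0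
  · have hx1 : x.length = 1 := by omega
    simp [List.length_dropLast, hx1]
  · have hl : 1 ≤ x.dropLast.length := by rw [List.length_dropLast]; omega
    have hy : y.length = x.dropLast.length + 1 := by rw [List.length_dropLast]; omega
    have hl' : 1 ≤ x.dropLast.reverse.length := by rwa [List.length_reverse]
    have hy' : y.length = x.dropLast.reverse.length + 1 := by rwa [List.length_reverse]
    rw [any_rot_eq x.dropLast y hl hy, any_rot_eq x.dropLast.reverse y hl' hy']
    by_cases hcl : y.getLastD 0 = y.headD 0
    · simp only [List.getLastD_eq_getLast?, List.headD_eq_head?] at hcl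
      simp [hcl, hn]
    · simp only [List.getLastD_eq_getLast?, List.headD_eq_head?] at hcl
      simp [hcl, hn]

-- ===== VERDICT (by name: the statement is the Claim_ definition above) =====
theorem equiv_spec : Claim_equal_equiv := by
  intro xs ys _
  unfold Spec_equiv equiv equiv_alt
  split
  · rfl
  · exact congrArg _ (funext fun p => checkPair_eq p.1 p.2)
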